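-- pv_equiv track=rewrite | github.com/CHEGU-HARSHITHA/INFO-550-AI-Final-Project | AI_Project/Sudoku/sudoku_backtrack.py | is_valid_assignment
-- ===== SOURCE A (Python) =====
-- def is_valid_assignment(grid, row, col, val):
--     """
--     Check if assigning a value to a cell in the grid violates any constraints.
--
--     Args:
--         grid: a 2D array representing the Sudoku puzzle.
--         row: the row of the cell to assign a value to.
--         col: the column of the cell to assign a value to.
--         val: the value to assign to the cell.
--
--     Returns:
--         True if the assignment is valid, False otherwise.
--     """
--     # Check row constraint
--     if val in grid[row]:
--         return False
--
--     # Check column constraint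
--     if val in [grid[i][col] for i in range(9)]:
--         return False
--
--     # Check subgrid constraint
--     subgrid_row = (row // 3) * 3
--     subgrid_col = (col // 3) * 3
--     if val in [grid[subgrid_row + i][subgrid_col + j] for i in range(3) for j in range(3)]:
--         return False
--
--     return True
-- ===== SOURCE B (Python) =====
-- def is_valid_assignment(grid, row, col, val):
--     """
--     Check if assigning a value to a cell in the grid violates any constraints.
--
--     The cell's own row is tested by direct membership; then, instead of
--     enumerating the column and the subgrid separately, one positional sweep
--     over every cell of the grid reports a conflict when that cell holds val
--     and its position shares the column or the 3x3 box with (row, col).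
--     """
--     if val in grid[row]:
--         return False
--     for i, cells in enumerate(grid):
--         for j, x in enumerate(cells):
--             if x == val and (j == col or (i // 3 == row // 3 and j // 3 == col // 3)):
--                 return False
--     return True
-- ===== Notes on version B (the rewrite author's own statement) =====
-- stated objective: alternative
-- what changed: B tests the cell's row by one membership check and then replaces A's column comprehension and subgrid double-comprehension with a single positional sweep over every cell of the grid, reporting a conflict when a cell equal to val shares the column or the 3x3 box with (row,col) by index arithmetic; correct on Sudoku grids because those positions are exactly the cells A's two comprehensions read.
import Mathlib
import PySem

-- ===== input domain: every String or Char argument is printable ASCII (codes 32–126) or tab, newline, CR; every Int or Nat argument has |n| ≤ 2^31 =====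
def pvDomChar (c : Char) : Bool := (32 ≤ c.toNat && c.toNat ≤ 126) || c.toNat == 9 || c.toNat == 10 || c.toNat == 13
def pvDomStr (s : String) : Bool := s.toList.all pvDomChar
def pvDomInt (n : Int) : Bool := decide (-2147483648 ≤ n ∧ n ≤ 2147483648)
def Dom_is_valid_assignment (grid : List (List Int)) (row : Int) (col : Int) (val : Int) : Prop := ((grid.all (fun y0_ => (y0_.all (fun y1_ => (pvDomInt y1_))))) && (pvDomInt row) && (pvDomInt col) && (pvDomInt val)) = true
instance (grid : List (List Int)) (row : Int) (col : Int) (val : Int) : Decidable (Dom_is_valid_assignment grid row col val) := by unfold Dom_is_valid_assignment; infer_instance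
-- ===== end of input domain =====

-- B keeps the row membership test but replaces A's column and subgrid comprehensions by one
-- positional sweep over every cell, testing unit-sharing by index arithmetic; objective: alternative.


-- ===== PORT A =====
-- grid[i][j] (chained Python indexing; none = IndexError)
def pyCell (grid : List (List Int)) (i j : Int) : Option Int :=
  (PySem.List.pyGet? grid i).bind fun r => PySem.List.pyGet? r j

def is_valid_assignment (grid : List (List Int)) (row : Int) (col : Int) (val : Int) : Bool :=
  match PySem.List.pyGet? grid row with
  | none => false   -- IndexError (outside Pre_)
  | some r =>
    if r.contains val then false
    else
      match (PySem.List.pyRange 0 9 1).mapM (fun i => pyCell grid i col) with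
      | none => false   -- IndexError (outside Pre_)
      | some colList =>
        if colList.contains val then false
        else
          let subgridRow := PySem.Int.floordiv row 3 * 3
          let subgridCol := PySem.Int.floordiv col 3 * 3
          match (PySem.List.pyRange 0 3 1).mapM (fun i =>
                  (PySem.List.pyRange 0 3 1).mapM (fun j =>
                    pyCell grid (subgridRow + i) (subgridCol + j))) with
          | none => false   -- IndexError (outside Pre_)
          | some subRows =>
            if subRows.flatten.contains val then false else true

-- ===== PORT B =====
-- Source B's double 'for … in enumerate' sweep with its early 'return False', as a Bool 'any'
def conflictScan (grid : List (List Int)) (row col val : Int) : Bool :=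
  (PySem.List.enumerate grid 0).any fun p =>
    (PySem.List.enumerate p.2 0).any fun q =>
      (q.2 == val) &&
        (q.1 == col ||
          (PySem.Int.floordiv p.1 3 == PySem.Int.floordiv row 3 &&
           PySem.Int.floordiv q.1 3 == PySem.Int.floordiv col 3))

def is_valid_assignment_alt (grid : List (List Int)) (row : Int) (col : Int) (val : Int) : Bool :=
  match PySem.List.pyGet? grid row with
  | none => false   -- IndexError on grid[row] (outside Pre_)
  | some r =>
    if r.contains val then false
    else ! conflictScan grid row col val

-- ===== PRECONDITION & SPEC =====
-- Pre_ admits the natural Sudoku domain (a 9×9 grid addressed by in-range nonnegative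
-- indices) plus every input whose answer is already decided by the row test (val sits in
-- grid[row], any shape, Python index semantics) — on those both return False. It excludes
-- inputs where A raises IndexError, and the non-9×9 grids / negative or out-of-range
-- indices that A happens to scan to completion, where A's value is an accident of the
-- grid's shape and Python's negative-index wraparound rather than a Sudoku judgement.
def Pre_is_valid_assignment (grid : List (List Int)) (row : Int) (col : Int) (val : Int) : Prop :=
  (grid.length = 9 ∧ (∀ r ∈ grid, r.length = 9) ∧ 0 ≤ row ∧ row < 9 ∧ 0 ≤ col ∧ col < 9)
  ∨ (PySem.Raise.InRange grid.length row ∧ val ∈ PySem.List.pyGetD grid row [])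
instance (grid : List (List Int)) (row : Int) (col : Int) (val : Int) : Decidable (Pre_is_valid_assignment grid row col val) := by unfold Pre_is_valid_assignment; infer_instance

def pvWitness_is_valid_assignment : List (List Int) × Int × Int × Int :=
  ([[5,3,0,0,7,0,0,0,0],[6,0,0,1,9,5,0,0,0],[0,9,8,0,0,0,0,6,0],
    [8,0,0,0,6,0,0,0,3],[4,0,0,8,0,3,0,0,1],[7,0,0,0,2,0,0,0,6],
    [0,6,0,0,0,0,2,8,0],[0,0,0,4,1,9,0,0,5],[0,0,0,0,8,0,0,7,9]], 0, 2, 4)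

def Spec_is_valid_assignment (grid : List (List Int)) (row : Int) (col : Int) (val : Int) (out : Bool) : Prop := out = is_valid_assignment_alt grid row col val
instance (grid : List (List Int)) (row : Int) (col : Int) (val : Int) (out : Bool) : Decidable (Spec_is_valid_assignment grid row col val out) := by unfold Spec_is_valid_assignment; infer_instance

-- ===== CLAIM (what is proved, stated in full; the proofs are below) =====
def Claim_equal_is_valid_assignment : Prop := ∀ (grid : List (List Int)) (row : Int) (col : Int) (val : Int), Dom_is_valid_assignment grid row col val → Pre_is_valid_assignment grid row col val → Spec_is_valid_assignment grid row col val (is_valid_assignment grid row col val)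

-- ===== LEMMAS AND PROOFS =====

-- a cell conflicting through the column or the 3×3 box, stated positionally (B's sweep)
def Conflict (grid : List (List Int)) (row col val : Int) : Prop :=
  ∃ k m : Nat, k < grid.length ∧ m < (grid.getD k []).length ∧
    (grid.getD k []).getD m 0 = val ∧
    ((m : Int) = col ∨ ((k : Int) / 3 = row / 3 ∧ (m : Int) / 3 = col / 3))

lemma mapM_char {α β : Type} {f : α → Option β} : ∀ {l : List α} {out : List β}, l.mapM f = some out →
    ∀ v, (v ∈ out ↔ ∃ x ∈ l, f x = some v) := by
  intro l
  induction l with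
  | nil => intro out h v; simp_all
  | cons a t ih =>
    intro out h v
    rw [List.mapM_cons] at h
    cases hfa : f a with
    | none => simp [hfa] at h
    | some b =>
      cases ht : t.mapM f with
      | none => simp [hfa, ht] at h
      | some bs =>
        simp [hfa, ht] at h
        subst h
        simp only [List.mem_cons, ih ht v]
        constructor
        · rintro (rfl | ⟨x, hx, hfx⟩)
          · exact ⟨a, Or.inl rfl, hfa⟩
          · exact ⟨x, Or.inr hx, hfx⟩
        · rintro ⟨x, (rfl | hx), hfx⟩
          · injection hfa.symm.trans hfx with h
            exact Or.inl h.symm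
          · exact Or.inr ⟨x, hx, hfx⟩

lemma mapM_isSome {α β : Type} {f : α → Option β} : ∀ {l : List α},
    (∀ x ∈ l, (f x).isSome) → (l.mapM f).isSome := by
  intro l
  induction l with
  | nil => simp
  | cons a t ih =>
    intro h
    rw [List.mapM_cons]
    have ha := h a (by simp)
    obtain ⟨b, hb⟩ := Option.isSome_iff_exists.mp ha
    obtain ⟨bs, hbs⟩ := Option.isSome_iff_exists.mp (ih fun x hx => h x (by simp [hx]))
    simp [hb, hbs]

lemma mapM_forall {α β : Type} {f : α → Option β} : ∀ {l : List α} {out : List β},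
    l.mapM f = some out → ∀ x ∈ l, ∃ y ∈ out, f x = some y := by
  intro l
  induction l with
  | nil => simp
  | cons a t ih =>
    intro out h x hx
    rw [List.mapM_cons] at h
    cases hfa : f a with
    | none => simp [hfa] at h
    | some b =>
      cases ht : t.mapM f with
      | none => simp [hfa, ht] at h
      | some bs =>
        simp [hfa, ht] at h
        subst h
        rcases List.mem_cons.mp hx with rfl | hx'
        · exact ⟨b, by simp, hfa⟩
        · obtain ⟨y, hy, hfy⟩ := ih ht x hx'
          exact ⟨y, by simp [hy], hfy⟩

lemma cell_isSome (grid : List (List Int)) (i j : Int)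
    (hg : grid.length = 9) (hrows : ∀ r ∈ grid, r.length = 9)
    (hi : 0 ≤ i ∧ i < 9) (hj : 0 ≤ j ∧ j < 9) : (pyCell grid i j).isSome := by
  have hi' : i < (grid.length : Int) := by omega
  rw [pyCell, PySem.List.pyGet?_eq_some_getElem grid hi.1 hi']
  have hr : grid[i.toNat] ∈ grid := List.getElem_mem _
  have hl : (grid[i.toNat] : List Int).length = 9 := hrows _ hr
  have hj' : j < ((grid[i.toNat] : List Int).length : Int) := by omega
  rw [Option.bind_some, PySem.List.pyGet?_eq_some_getElem _ hj.1 hj']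
  rfl

-- chained Python indexing read through List.getD, for in-range nonnegative indices
lemma pyCell_eq_iff (grid : List (List Int)) (i j v : Int)
    (hi : 0 ≤ i) (hil : i < (grid.length : Int))
    (hj : 0 ≤ j) (hjl : j < ((grid.getD i.toNat []).length : Int)) :
    pyCell grid i j = some v ↔ (grid.getD i.toNat []).getD j.toNat 0 = v := by
  have hi' : i.toNat < grid.length := by omega
  rw [pyCell, PySem.List.pyGet?_eq_some_getElem grid hi hil, Option.bind_some]
  rw [List.getD_eq_getElem grid [] hi'] at hjl ⊢
  have hj' : j.toNat < (grid[i.toNat] : List Int).length := by omega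
  rw [PySem.List.pyGet?_eq_some_getElem _ hj (by omega), List.getD_eq_getElem _ 0 hj']
  exact ⟨fun h => Option.some.inj h, fun h => h ▸ rfl⟩

-- B's sweep fires  ↔  some cell holding val shares the column or box; no shape hypotheses
lemma scan_true_iff (grid : List (List Int)) (row col val : Int) :
    conflictScan grid row col val = true ↔ Conflict grid row col val := by
  rw [conflictScan, List.any_eq_true]
  have h3 : (0:Int) < 3 := by omega
  unfold Conflict
  constructor
  · rintro ⟨p, hp, hinner⟩
    obtain ⟨k, hk, rfl⟩ := (PySem.List.mem_enumerate_iff grid 0 p).mp hp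
    obtain ⟨q, hq, hbody⟩ := List.any_eq_true.mp hinner
    obtain ⟨m, hm, rfl⟩ := (PySem.List.mem_enumerate_iff _ 0 q).mp hq
    rw [PySem.Int.floordiv_eq_ediv_of_pos h3, PySem.Int.floordiv_eq_ediv_of_pos h3,
      PySem.Int.floordiv_eq_ediv_of_pos h3, PySem.Int.floordiv_eq_ediv_of_pos h3] at hbody
    simp only [Bool.and_eq_true, Bool.or_eq_true, beq_iff_eq, zero_add] at hbody
    refine ⟨k, m, hk, by rw [List.getD_eq_getElem grid [] hk]; exact hm, ?_, ?_⟩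
    · rw [List.getD_eq_getElem grid [] hk, List.getD_eq_getElem _ 0 hm]
      exact hbody.1
    · tauto
  · rintro ⟨k, m, hk, hm, hval, hor⟩
    rw [List.getD_eq_getElem grid [] hk] at hm hval
    refine ⟨(0 + (k : Int), grid[k]),
      (PySem.List.mem_enumerate_iff grid 0 _).mpr ⟨k, hk, rfl⟩, List.any_eq_true.mpr
      ⟨(0 + (m : Int), grid[k][m]),
        (PySem.List.mem_enumerate_iff _ 0 _).mpr ⟨m, hm, rfl⟩, ?_⟩⟩
    rw [PySem.Int.floordiv_eq_ediv_of_pos h3, PySem.Int.floordiv_eq_ediv_of_pos h3,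
      PySem.Int.floordiv_eq_ediv_of_pos h3, PySem.Int.floordiv_eq_ediv_of_pos h3]
    simp only [Bool.and_eq_true, Bool.or_eq_true, beq_iff_eq, zero_add]
    rw [List.getD_eq_getElem _ 0 hm] at hval
    exact ⟨hval, by tauto⟩

lemma pyGetD_of_pyGet?_some {α : Type} {xs : List α} {i : Int} {x : α} (d : α)
    (h : PySem.List.pyGet? xs i = some x) : PySem.List.pyGetD xs i d = x := by
  simp only [PySem.List.pyGetD, PySem.List.pyGet?] at h ⊢
  simp [h]

-- ===== VERDICT (by name: the statement is the Claim_ definition above) =====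
theorem is_valid_assignment_spec : Claim_equal_is_valid_assignment := by
  intro grid row col val _ hpre
  unfold Spec_is_valid_assignment
  have h3 : (0:Int) < 3 := by omega
  rcases hpre with ⟨hg, hrows, hr0, hr9, hc0, hc9⟩ | ⟨hin, hmem⟩
  · -- proper 9×9 Sudoku input
    have hrow' : row < (grid.length : Int) := by omega
    have hgr := PySem.List.pyGet?_eq_some_getElem grid hr0 hrow'
    have hrn : row.toNat < grid.length := by omega
    have hrmem : grid[row.toNat] ∈ grid := List.getElem_mem _
    have hrlen : (grid[row.toNat] : List Int).length = 9 := hrows _ hrmem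
    have hlen9 : ∀ k : Nat, k < grid.length → (grid.getD k []).length = 9 := fun k hk => by
      rw [List.getD_eq_getElem grid [] hk]; exact hrows _ (List.getElem_mem _)
    cases hcont : (grid[row.toNat] : List Int).contains val with
    | true =>
      -- the row test fires on both sides
      rw [is_valid_assignment, is_valid_assignment_alt]
      simp only [hgr, hcont, if_true]
    | false =>
      have hcolS : (((PySem.List.pyRange 0 9 1)).mapM (fun i => pyCell grid i col)).isSome :=
        mapM_isSome fun x hx =>
          cell_isSome grid x col hg hrows (PySem.List.mem_pyRange_one.mp hx) ⟨hc0, hc9⟩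
      obtain ⟨colList, hcol⟩ := Option.isSome_iff_exists.mp hcolS
      have hde : PySem.Int.floordiv row 3 = row / 3 := PySem.Int.floordiv_eq_ediv_of_pos h3
      have hde' : PySem.Int.floordiv col 3 = col / 3 := PySem.Int.floordiv_eq_ediv_of_pos h3
      have hsubS : (((PySem.List.pyRange 0 3 1)).mapM (fun i =>
          (PySem.List.pyRange 0 3 1).mapM (fun j =>
            pyCell grid (PySem.Int.floordiv row 3 * 3 + i) (PySem.Int.floordiv col 3 * 3 + j)))).isSome := by
        refine mapM_isSome fun x hx => mapM_isSome fun y hy => ?_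
        have hx' := PySem.List.mem_pyRange_one.mp hx
        have hy' := PySem.List.mem_pyRange_one.mp hy
        rw [hde, hde']
        exact cell_isSome grid _ _ hg hrows (by constructor <;> omega) (by constructor <;> omega)
      obtain ⟨subRows, hsub⟩ := Option.isSome_iff_exists.mp hsubS
      have key : (colList.contains val = true ∨
          subRows.flatten.contains val = true) ↔ Conflict grid row col val := by
        constructor
        · rintro (h2 | h3c)
          · obtain ⟨i, hi, hie⟩ := (mapM_char hcol val).mp (List.contains_iff_mem.mp h2)
            have hi' := PySem.List.mem_pyRange_one.mp hi
            have hil : i.toNat < grid.length := by omega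
            refine ⟨i.toNat, col.toNat, hil, by rw [hlen9 _ hil]; omega, ?_,
              Or.inl (by omega)⟩
            exact (pyCell_eq_iff grid i col val hi'.1 (by omega) hc0
              (by rw [hlen9 _ hil]; omega)).mp hie
          · obtain ⟨l, hl, hvl⟩ := List.mem_flatten.mp (List.contains_iff_mem.mp h3c)
            obtain ⟨x, hx, hxe⟩ := (mapM_char hsub l).mp hl
            obtain ⟨y, hy, hye⟩ := (mapM_char hxe val).mp hvl
            have hx' := PySem.List.mem_pyRange_one.mp hx
            have hy' := PySem.List.mem_pyRange_one.mp hy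
            rw [hde, hde'] at hye
            have hI : (0:Int) ≤ row / 3 * 3 + x := by omega
            have hIl : (row / 3 * 3 + x).toNat < grid.length := by omega
            refine ⟨(row / 3 * 3 + x).toNat, (col / 3 * 3 + y).toNat, hIl,
              by rw [hlen9 _ hIl]; omega, ?_, Or.inr ⟨by omega, by omega⟩⟩
            exact (pyCell_eq_iff grid _ _ val hI (by omega) (by omega)
              (by rw [hlen9 _ hIl]; omega)).mp hye
        · rintro ⟨k, m, hk, hm, hval, (hmc | hbox)⟩
          · left
            refine List.contains_iff_mem.mpr ((mapM_char hcol val).mpr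
              ⟨(k : Int), PySem.List.mem_pyRange_one.mpr (by constructor <;> omega), ?_⟩)
            refine (pyCell_eq_iff grid (k : Int) col val (by omega) (by omega) hc0
              (by simp only [Int.toNat_natCast]; rw [hlen9 _ hk]; omega)).mpr ?_
            have hmcol : m = col.toNat := by omega
            simpa [hmcol] using hval
          · right
            obtain ⟨hbr, hbc⟩ := hbox
            have hxb : (0:Int) ≤ (k : Int) - row / 3 * 3 ∧ (k : Int) - row / 3 * 3 < 3 := by
              constructor <;> omega
            have hyb : (0:Int) ≤ (m : Int) - col / 3 * 3 ∧ (m : Int) - col / 3 * 3 < 3 := by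
              rw [hlen9 _ hk] at hm
              constructor <;> omega
            obtain ⟨l, hl, hle⟩ := mapM_forall hsub ((k : Int) - row / 3 * 3)
              (PySem.List.mem_pyRange_one.mpr hxb)
            refine List.contains_iff_mem.mpr (List.mem_flatten.mpr ⟨l, hl, ?_⟩)
            refine (mapM_char hle val).mpr ⟨(m : Int) - col / 3 * 3,
              PySem.List.mem_pyRange_one.mpr hyb, ?_⟩
            rw [hde, hde']
            have hie : row / 3 * 3 + ((k : Int) - row / 3 * 3) = (k : Int) := by omega
            have hje : col / 3 * 3 + ((m : Int) - col / 3 * 3) = (m : Int) := by omega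
            rw [hie, hje]
            refine (pyCell_eq_iff grid (k : Int) (m : Int) val (by omega) (by omega) (by omega)
              (by simp only [Int.toNat_natCast]; omega)).mpr ?_
            simpa using hval
      have hA : is_valid_assignment grid row col val = true ↔ ¬ Conflict grid row col val := by
        rw [is_valid_assignment]
        simp only [hgr, hcont, hcol, hsub, Bool.false_eq_true, if_false]
        constructor
        · intro h hc
          split_ifs at h with h2 h3c
          exact (key.mpr hc).elim h2 h3c
        · intro hnc
          have := fun h => hnc (key.mp h)
          split_ifs with h2 h3c
          · exact absurd (Or.inl h2) this
          · exact absurd (Or.inr h3c) this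
          · rfl
      have hB : is_valid_assignment_alt grid row col val = true ↔ ¬ Conflict grid row col val := by
        rw [is_valid_assignment_alt]
        simp only [hgr, hcont, Bool.false_eq_true, if_false, Bool.not_eq_eq_eq_not, Bool.not_true]
        rw [Bool.eq_false_iff, Ne, scan_true_iff]
      have hAB := hA.trans hB.symm
      cases hx : is_valid_assignment grid row col val <;>
        cases hy : is_valid_assignment_alt grid row col val <;>
          rw [hx, hy] at hAB <;> simp_all
  · -- the row test already decides it: val sits in grid[row] (any shape, Python indexing)
    cases hr : PySem.List.pyGet? grid row with
    | none => exact absurd hin ((PySem.List.pyGet?_eq_none_iff grid row).mp hr)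
    | some r =>
      rw [pyGetD_of_pyGet?_some [] hr] at hmem
      have hcont : r.contains val = true := List.contains_iff_mem.mpr hmem
      rw [is_valid_assignment, is_valid_assignment_alt]
      simp only [hr, hcont, if_true]
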